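-- pv_equiv track=rewrite | github.com/InesCadete/Computer-Science-IST | FP/Proj1-FP/Projeto_1/projeto1.py | conta_ocorren
-- ===== SOURCE A (Python) =====
-- def conta_ocorren(cif):
--     """
--     3.2.2 validar cifra: cad. carateres × cad. carateres → booleano
--     Recebe uma cadeia de carateres contendo uma cifra e uma outra cadeia de
--     carateres contendo uma sequencia de controlo, e devolve True se a sequencia de
--     controlo e coerente com a cifra
--     """
--     dic_let = {}
--     lst_string= list(cif)
--     a = sorted(lst_string) #fica ordenado alfabeticamente
--     for el in a:
--         if el != "-":
--             dic_let[el] = a.count(el)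
--     #devolve as chaves do dicionario ordenadas pela ocorrencia (descendente)
--     lf = sorted(dic_let, key=dic_let.get, reverse = True)
--     dic_let = sorted(dic_let)
--
--     return lf
-- ===== SOURCE B (Python) =====
-- def conta_ocorren(cif):
--     # Bucket (counting-sort) approach: one counting pass, then buckets keyed
--     # by occurrence count, traversed from the highest count down, each bucket
--     # in ascending alphabetical order.
--     counts = {}
--     for ch in cif:
--         if ch != "-":
--             counts[ch] = counts.get(ch, 0) + 1
--     buckets = {}
--     for ch, c in counts.items():
--         buckets[c] = buckets.get(c, []) + [ch]
--     res = []
--     for c in range(len(cif), 0, -1):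
--         res += sorted(buckets.get(c, []))
--     return res
-- ===== Notes on version B (the rewrite author's own statement) =====
-- stated objective: faster
-- what changed: A sorts the whole string, rescans the sorted copy with a.count for every element (quadratic) and then comparison-sorts the dict keys by count; B makes one counting pass into a dict, distributes the distinct characters into buckets keyed by their count, and emits the buckets from the highest count down, each in ascending alphabetical order (counting sort by frequency).
import Mathlib
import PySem

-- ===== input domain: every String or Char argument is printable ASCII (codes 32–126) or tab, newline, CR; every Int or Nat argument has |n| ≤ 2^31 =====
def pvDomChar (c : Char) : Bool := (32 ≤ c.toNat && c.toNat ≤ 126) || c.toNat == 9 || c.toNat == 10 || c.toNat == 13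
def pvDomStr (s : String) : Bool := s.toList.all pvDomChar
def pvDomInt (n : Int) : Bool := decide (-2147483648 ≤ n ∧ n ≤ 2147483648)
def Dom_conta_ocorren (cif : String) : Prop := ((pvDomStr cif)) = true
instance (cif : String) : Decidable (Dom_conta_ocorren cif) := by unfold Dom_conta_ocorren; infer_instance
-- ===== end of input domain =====

-- B replaces A's per-element a.count scan over the sorted copy and its comparison sort of the
-- keys by one counting pass into a dict plus count-keyed buckets traversed from the highest
-- count down, each bucket in ascending alphabetical order (faster).

-- ===== PORT A =====
def conta_ocorren (cif : String) : List String :=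
  let lst_string := cif.toList.map (fun c => String.ofList [c])
  let a := PySem.List.sorted lst_string (fun x => x) false
  let dic_let : PySem.Dict String Int :=
    a.foldl (fun d el =>
      if el != "-" then d.insert el ((PySem.List.count a el : Int)) else d) PySem.Dict.empty
  let lf := PySem.List.sorted (PySem.Dict.keys dic_let) (fun k => PySem.Dict.getD dic_let k 0) true
  let _dic_let2 := PySem.List.sorted (PySem.Dict.keys dic_let) (fun x => x) false
  lf

-- ===== PORT B =====
def conta_ocorren_alt (cif : String) : List String :=
  let counts : PySem.Dict String Int :=
    cif.toList.foldl (fun d c =>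
      if String.ofList [c] != "-" then
        d.insert (String.ofList [c]) (d.getD (String.ofList [c]) 0 + 1) else d)
      PySem.Dict.empty
  let buckets : PySem.Dict Int (List String) :=
    counts.items.foldl (fun b p => b.modify p.2 [] (fun l => l ++ [p.1])) PySem.Dict.empty
  (PySem.List.pyRange (PySem.Str.len cif) 0 (-1)).foldl
    (fun res c => res ++ PySem.List.sorted (buckets.getD c []) (fun x => x) false) []

-- ===== PRECONDITION & SPEC =====
def Spec_conta_ocorren (cif : String) (out : List String) : Prop := out = conta_ocorren_alt cif
instance (cif : String) (out : List String) : Decidable (Spec_conta_ocorren cif out) := by unfold Spec_conta_ocorren; infer_instance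

-- ===== CLAIM (what is proved, stated in full; the proofs are below) =====
def Claim_equal_conta_ocorren : Prop := ∀ (cif : String), Dom_conta_ocorren cif → Spec_conta_ocorren cif (conta_ocorren cif)

-- ===== LEMMAS AND PROOFS =====

-- the list of 1-char strings of cif, and its non-'-' part
def pvL (cif : String) : List String := cif.toList.map (fun c => String.ofList [c])
def pvFL (cif : String) : List String := (pvL cif).filter (fun s => s != "-")
-- occurrence count of a character (as a 1-char string), as Python stores it
def pvCnt (cif : String) (k : String) : Int := (List.count k (pvFL cif) : Int)
-- the output order: count descending, ties by ascending string
def pvR (cif : String) (a b : String) : Prop :=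
  pvCnt cif b < pvCnt cif a ∨ (pvCnt cif a = pvCnt cif b ∧ a < b)


theorem pv_insertBy_pairwise (key : String → Int) (x : String) (ys : List String)
    (hys : ys.Pairwise (fun a b => key b < key a ∨ (key a = key b ∧ a < b)))
    (hlt : ∀ y ∈ ys, y < x) :
    (PySem.List.insertBy (fun a b => decide (key b < key a)) x ys).Pairwise
      (fun a b => key b < key a ∨ (key a = key b ∧ a < b)) := by
  induction ys with
  | nil => simp [PySem.List.insertBy]
  | cons y ys ih =>
    rw [List.pairwise_cons] at hys
    obtain ⟨hy, hys⟩ := hys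
    by_cases h : key y < key x
    · simp only [PySem.List.insertBy, h, decide_true, if_true]
      refine List.Pairwise.cons ?_ (List.Pairwise.cons hy hys)
      intro z hz
      rcases List.mem_cons.mp hz with rfl | hz
      · exact Or.inl h
      · rcases hy z hz with h' | ⟨h', _⟩
        · exact Or.inl (h'.trans h)
        · exact Or.inl (h' ▸ h)
    · simp only [PySem.List.insertBy, h, decide_false, if_false, Bool.false_eq_true]
      refine List.Pairwise.cons ?_ (ih hys (fun z hz => hlt z (List.mem_cons_of_mem _ hz)))
      intro z hz
      rw [PySem.List.mem_insertBy] at hz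
      rcases hz with rfl | hz
      · rcases lt_or_eq_of_le (not_lt.mp h) with h' | h'
        · exact Or.inl h'
        · exact Or.inr ⟨h'.symm, hlt y (List.mem_cons_self)⟩
      · exact hy z hz

theorem pv_sorted_rev_pairwise_aux (key : String → Int) (xs acc : List String)
    (hxs : xs.Pairwise (· < ·))
    (hacc : acc.Pairwise (fun a b => key b < key a ∨ (key a = key b ∧ a < b)))
    (hcross : ∀ y ∈ acc, ∀ x ∈ xs, y < x) :
    (xs.foldl (fun acc x => PySem.List.insertBy (fun a b => decide (key b < key a)) x acc) acc).Pairwise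
      (fun a b => key b < key a ∨ (key a = key b ∧ a < b)) := by
  induction xs generalizing acc with
  | nil => exact hacc
  | cons x xs ih =>
    rw [List.pairwise_cons] at hxs
    obtain ⟨hx, hxs⟩ := hxs
    refine ih _ hxs (pv_insertBy_pairwise key x acc hacc
      (fun y hy => hcross y hy x List.mem_cons_self)) ?_
    intro y hy z hz
    rw [PySem.List.mem_insertBy] at hy
    rcases hy with rfl | hy
    · exact hx z hz
    · exact hcross y hy z (List.mem_cons_of_mem _ hz)

theorem pv_sorted_rev_pairwise (key : String → Int) (xs : List String)
    (hxs : xs.Pairwise (· < ·)) :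
    (PySem.List.sorted xs key true).Pairwise
      (fun a b => key b < key a ∨ (key a = key b ∧ a < b)) := by
  rw [PySem.List.sorted_rev_eq_foldl_insertBy]
  exact pv_sorted_rev_pairwise_aux key xs [] hxs (by simp) (by simp)


theorem pv_ofList_aux (l s : List String) (hs : s.Pairwise (· < ·))
    (hcross : ∀ y ∈ s, ∀ x ∈ l, y ≤ x) (hl : l.Pairwise (· ≤ ·)) :
    (l.foldl PySem.Set.add s).Pairwise (· < ·) := by
  induction l generalizing s with
  | nil => exact hs
  | cons x xs ih =>
    rw [List.pairwise_cons] at hl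
    obtain ⟨hx, hl⟩ := hl
    simp only [List.foldl_cons]
    by_cases h : PySem.Set.contains s x
    · rw [PySem.Set.add, if_pos h]
      exact ih s hs (fun y hy z hz => le_trans (hcross y hy x List.mem_cons_self) (hx z hz)) hl
    · rw [PySem.Set.add, if_neg h]
      refine ih _ ?_ ?_ hl
      · rw [List.pairwise_append]
        refine ⟨hs, List.pairwise_singleton _ _, ?_⟩
        intro y hy z hz
        rw [List.mem_singleton] at hz
        subst hz
        refine lt_of_le_of_ne (hcross y hy z List.mem_cons_self) ?_
        rintro rfl
        exact h (by simpa [PySem.Set.contains] using hy)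
      · intro y hy z hz
        rw [List.mem_append, List.mem_singleton] at hy
        rcases hy with hy | rfl
        · exact le_trans (hcross y hy x List.mem_cons_self) (hx z hz)
        · exact hx z hz

theorem pv_ofList_pairwise_lt (l : List String) (h : l.Pairwise (· ≤ ·)) :
    (PySem.Set.ofList l).Pairwise (· < ·) := by
  rw [PySem.Set.ofList_eq_foldl]
  exact pv_ofList_aux l [] (by simp) (by simp) h

theorem pv_getD_foldl_insert_absent (g : String → Int) (l : List String)
    (d : PySem.Dict String Int) (k : String) (hk : k ∉ l) :
    (l.foldl (fun d x => d.insert x (g x)) d).getD k 0 = d.getD k 0 := by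
  induction l generalizing d with
  | nil => rfl
  | cons x xs ih =>
    simp only [List.foldl_cons]
    rw [ih _ (fun h => hk (List.mem_cons_of_mem _ h)),
      PySem.Dict.getD_insert, if_neg (fun h' => hk (by rw [h']; exact List.mem_cons_self))]

theorem pv_getD_foldl_insert_const (g : String → Int) (l : List String)
    (d : PySem.Dict String Int) (k : String) (hk : k ∈ l) :
    (l.foldl (fun d x => d.insert x (g x)) d).getD k 0 = g k := by
  induction l generalizing d with
  | nil => simp at hk
  | cons x xs ih =>
    simp only [List.foldl_cons]
    by_cases h : k ∈ xs
    · exact ih _ h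
    · rcases List.mem_cons.mp hk with rfl | h'
      · rw [pv_getD_foldl_insert_absent g xs _ k h, PySem.Dict.getD_insert, if_pos rfl]
      · exact absurd h' h

theorem pv_filter_or_perm (p q : String → Bool) (l : List String)
    (h : ∀ x, ¬(p x = true ∧ q x = true)) :
    (l.filter (fun x => p x || q x)).Perm (l.filter p ++ l.filter q) := by
  induction l with
  | nil => simp
  | cons x xs ih =>
    by_cases hp : p x
    · have hq : q x = false := by
        rcases Bool.eq_false_or_eq_true (q x) with h' | h'
        · exact absurd ⟨hp, h'⟩ (h x)
        · exact h'
      simp only [List.filter_cons, hp, hq, Bool.true_or, if_true]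
      simpa using ih.cons x
    · simp only [Bool.not_eq_true] at hp
      by_cases hq : q x
      · simp only [List.filter_cons, hp, hq, Bool.false_or, if_true]
        exact (ih.cons x).trans List.perm_middle.symm
      · simp only [Bool.not_eq_true] at hq
        simp only [List.filter_cons, hp, hq, Bool.false_or]
        exact ih

theorem pv_pairwise_lt_of_le_nodup (l : List String) (h1 : l.Pairwise (· ≤ ·))
    (h2 : l.Nodup) : l.Pairwise (· < ·) := by
  exact (h1.and h2).imp (fun h => lt_of_le_of_ne h.1 h.2)

theorem pv_mem_bucket (cif : String) (c : Int) (x : String)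
    (hx : x ∈ PySem.List.sorted
        ((PySem.Set.ofList (pvFL cif)).filter (fun k => pvCnt cif k == c)) (fun x => x) false) :
    pvCnt cif x = c := by
  rw [PySem.List.mem_sorted] at hx
  exact beq_iff_eq.mp (List.mem_filter.mp hx).2

theorem pv_flatMap_perm (cif : String) (cs : List Int) (hnd : cs.Nodup) :
    (cs.flatMap (fun c => PySem.List.sorted
        ((PySem.Set.ofList (pvFL cif)).filter (fun k => pvCnt cif k == c)) (fun x => x) false)).Perm
      ((PySem.Set.ofList (pvFL cif)).filter (fun k => decide (pvCnt cif k ∈ cs))) := by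
  induction cs with
  | nil => simp
  | cons c cs ih =>
    rw [List.flatMap_cons]
    rw [List.nodup_cons] at hnd
    have hdj : ∀ x, ¬((pvCnt cif x == c) = true ∧ (decide (pvCnt cif x ∈ cs)) = true) := by
      intro x ⟨h1, h2⟩
      rw [beq_iff_eq] at h1
      rw [decide_eq_true_eq] at h2
      exact hnd.1 (h1 ▸ h2)
    have hpt : ∀ x ∈ PySem.Set.ofList (pvFL cif),
        ((pvCnt cif x == c) || decide (pvCnt cif x ∈ cs)) = decide (pvCnt cif x ∈ c :: cs) := by
      intro x _
      by_cases h1 : pvCnt cif x = c <;> by_cases h2 : pvCnt cif x ∈ cs <;>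
        simp [h1, h2, List.mem_cons]
    refine List.Perm.trans
      (List.Perm.append (PySem.List.sorted_perm _ _ _) (ih hnd.2)) ?_
    refine List.Perm.trans (pv_filter_or_perm _ _ _ hdj).symm ?_
    rw [List.filter_congr hpt]

theorem pv_flatMap_pairwise (cif : String) (cs : List Int)
    (hcs : cs.Pairwise (fun a b => b < a)) :
    (cs.flatMap (fun c => PySem.List.sorted
        ((PySem.Set.ofList (pvFL cif)).filter (fun k => pvCnt cif k == c)) (fun x => x) false)).Pairwise
      (pvR cif) := by
  induction cs with
  | nil => simp
  | cons c cs ih =>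
    rw [List.pairwise_cons] at hcs
    rw [List.flatMap_cons, List.pairwise_append]
    refine ⟨?_, ih hcs.2, ?_⟩
    · -- within a bucket: equal counts, strictly increasing strings
      have hnd : (PySem.List.sorted
          ((PySem.Set.ofList (pvFL cif)).filter (fun k => pvCnt cif k == c)) (fun x => x) false).Nodup := by
        rw [(PySem.List.sorted_perm _ _ _).nodup_iff]
        exact (PySem.Set.nodup_ofList _).filter _
      have hle := PySem.List.sorted_pairwise
        ((PySem.Set.ofList (pvFL cif)).filter (fun k => pvCnt cif k == c)) (fun x => x)
      refine (pv_pairwise_lt_of_le_nodup _ hle hnd).imp_of_mem ?_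
      intro a b ha hb hab
      exact Or.inr ⟨(pv_mem_bucket cif c a ha).trans (pv_mem_bucket cif c b hb).symm, hab⟩
    · -- across buckets: counts strictly decrease
      intro a ha b hb
      rw [List.mem_flatMap] at hb
      obtain ⟨c', hc', hb⟩ := hb
      exact Or.inl (by rw [pv_mem_bucket cif c a ha, pv_mem_bucket cif c' b hb]; exact hcs.1 c' hc')


-- ===== A-side =====

-- A's sorted copy of the input, and A's dict
def pvA (cif : String) : List String := PySem.List.sorted (pvL cif) (fun x => x) false
def pvFLA (cif : String) : List String := (pvA cif).filter (fun s => s != "-")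
def pvDA (cif : String) : PySem.Dict String Int :=
  (pvFLA cif).foldl (fun d el => d.insert el ((PySem.List.count (pvA cif) el : Int))) PySem.Dict.empty

theorem pv_A_eq (cif : String) : conta_ocorren cif =
    PySem.List.sorted (PySem.Dict.keys (pvDA cif)) (fun k => PySem.Dict.getD (pvDA cif) k 0) true := by
  simp only [conta_ocorren, pvDA, pvFLA, pvA, pvL, List.foldl_filter]

theorem pv_keysA (cif : String) : PySem.Dict.keys (pvDA cif) = PySem.Set.ofList (pvFLA cif) := by
  rw [pvDA, PySem.Dict.keys_foldl_insert, PySem.Dict.keys_empty, PySem.Set.update_nil_left]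

theorem pv_flA_pairwise (cif : String) : (pvFLA cif).Pairwise (· ≤ ·) :=
  (PySem.List.sorted_pairwise (pvL cif) (fun x => x)).filter _

theorem pv_mem_flA (cif : String) (k : String) : k ∈ pvFLA cif ↔ k ∈ pvFL cif := by
  simp only [pvFLA, pvFL, List.mem_filter, pvA, PySem.List.mem_sorted]

theorem pv_cnt_flA (cif : String) (k : String) (hk : k ∈ pvFLA cif) :
    (PySem.List.count (pvA cif) k : Int) = pvCnt cif k := by
  simp only [pvFLA] at hk
  rw [PySem.List.count_eq, pvCnt, pvA, (PySem.List.sorted_perm (pvL cif) (fun x => x) false).count_eq k,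
    pvFL, List.count_filter (p := fun s => s != "-") (a := k) (l := pvL cif) (List.mem_filter.mp hk).2]

theorem pv_getDA (cif : String) (k : String) (hk : k ∈ PySem.Dict.keys (pvDA cif)) :
    PySem.Dict.getD (pvDA cif) k 0 = pvCnt cif k := by
  rw [pv_keysA, PySem.Set.mem_ofList] at hk
  rw [pvDA, pv_getD_foldl_insert_const _ _ _ _ hk, pv_cnt_flA cif k hk]

theorem pv_A_perm (cif : String) : (conta_ocorren cif).Perm (PySem.Set.ofList (pvFL cif)) := by
  rw [pv_A_eq]
  refine ((PySem.List.sorted_perm _ _ _).trans ?_)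
  rw [pv_keysA]
  rw [List.perm_ext_iff_of_nodup (PySem.Set.nodup_ofList _) (PySem.Set.nodup_ofList _)]
  intro x
  rw [PySem.Set.mem_ofList, PySem.Set.mem_ofList, pv_mem_flA]

theorem pv_A_pairwise (cif : String) : (conta_ocorren cif).Pairwise (pvR cif) := by
  rw [pv_A_eq]
  have h := pv_sorted_rev_pairwise (fun k => PySem.Dict.getD (pvDA cif) k 0)
    (PySem.Dict.keys (pvDA cif))
    (by rw [pv_keysA]; exact pv_ofList_pairwise_lt _ (pv_flA_pairwise cif))
  refine h.imp_of_mem ?_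
  intro a b ha hb hab
  rw [PySem.List.mem_sorted] at ha hb
  simp only at hab
  rw [pv_getDA cif a ha, pv_getDA cif b hb] at hab
  exact hab

-- ===== B-side =====

theorem pv_counts_aux (cl : List Char) (d : PySem.Dict String Int) :
    cl.foldl (fun d c =>
      if String.ofList [c] != "-" then
        d.insert (String.ofList [c]) (d.getD (String.ofList [c]) 0 + 1) else d) d
    = ((cl.map (fun c => String.ofList [c])).filter (fun s => s != "-")).foldl
        (fun d ch => d.insert ch (d.getD ch 0 + 1)) d := by
  induction cl generalizing d with
  | nil => rfl
  | cons c cl ih =>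
    simp only [List.foldl_cons, List.map_cons, List.filter_cons]
    by_cases h : (String.ofList [c] != "-") = true
    · rw [if_pos h, if_pos h, List.foldl_cons]
      exact ih _
    · rw [if_neg h, if_neg h]
      exact ih _

theorem pv_counts_eq (cif : String) :
    cif.toList.foldl (fun d c =>
      if String.ofList [c] != "-" then
        d.insert (String.ofList [c]) (d.getD (String.ofList [c]) 0 + 1) else d) PySem.Dict.empty
    = PySem.Dict.counter (pvFL cif) := by
  rw [pv_counts_aux, pvFL, pvL]
  exact PySem.Dict.foldl_insert_getD_add_one_eq_counter _

theorem pv_buckets_aux (l : List (String × Int)) (b : PySem.Dict Int (List String)) :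
    l.foldl (fun b p => b.modify p.2 [] (fun t => t ++ [p.1])) b
    = (l.map (fun p => (p.2, p.1))).foldl (fun b q => b.modify q.1 [] (fun t => t ++ [q.2])) b := by
  induction l generalizing b with
  | nil => rfl
  | cons p l ih => simp only [List.foldl_cons, List.map_cons]; rw [ih]

theorem pv_buckets_getD (cif : String) (c : Int) :
    ((PySem.Dict.counter (pvFL cif)).items.foldl
      (fun b p => b.modify p.2 [] (fun t => t ++ [p.1])) PySem.Dict.empty).getD c []
    = (PySem.Set.ofList (pvFL cif)).filter (fun k => pvCnt cif k == c) := by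
  rw [pv_buckets_aux, PySem.Dict.getD_foldl_modify_append, PySem.Dict.items_counter]
  simp only [List.map_map, Function.comp_def, List.filter_map, PySem.Dict.getD_empty,
    List.nil_append, List.map_id', pvCnt]

theorem pv_B_eq (cif : String) : conta_ocorren_alt cif =
    (PySem.List.pyRange (PySem.Str.len cif) 0 (-1)).flatMap (fun c => PySem.List.sorted
      ((PySem.Set.ofList (pvFL cif)).filter (fun k => pvCnt cif k == c)) (fun x => x) false) := by
  simp only [conta_ocorren_alt]
  rw [pv_counts_eq]
  rw [List.foldl_ext _ (fun res c => res ++ PySem.List.sorted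
      ((PySem.Set.ofList (pvFL cif)).filter (fun k => pvCnt cif k == c)) (fun x => x) false) []
    (fun acc c _ => by rw [pv_buckets_getD])]
  rw [PySem.List.foldl_append_eq_flatMap, List.nil_append]

theorem pv_range_nodup (cif : String) :
    (PySem.List.pyRange (PySem.Str.len cif) 0 (-1)).Nodup := by
  rw [PySem.List.pyRange_neg_one]
  refine List.Nodup.map ?_ List.nodup_range
  intro a b hab
  simp only at hab
  omega

theorem pv_range_pairwise (cif : String) :
    (PySem.List.pyRange (PySem.Str.len cif) 0 (-1)).Pairwise (fun a b => b < a) := by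
  rw [PySem.List.pyRange_neg_one]
  exact List.Pairwise.map _ (fun a b h => by omega) List.pairwise_lt_range

theorem pv_mem_range_counts (cif : String) (k : String)
    (hk : k ∈ PySem.Set.ofList (pvFL cif)) :
    pvCnt cif k ∈ PySem.List.pyRange (PySem.Str.len cif) 0 (-1) := by
  rw [PySem.Set.mem_ofList] at hk
  have h1 : 0 < List.count k (pvFL cif) := List.count_pos_iff.mpr hk
  have h2 : List.count k (pvFL cif) ≤ cif.toList.length := by
    refine le_trans List.count_le_length ?_
    refine le_trans (List.length_filter_le _ _) ?_
    rw [pvL, List.length_map]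
  rw [PySem.List.pyRange_neg_one, List.mem_map]
  refine ⟨((PySem.Str.len cif) - pvCnt cif k).toNat, ?_, ?_⟩
  · rw [List.mem_range]
    simp only [pvCnt, PySem.Str.len]
    omega
  · simp only [pvCnt, PySem.Str.len]
    omega

theorem pv_B_perm (cif : String) : (conta_ocorren_alt cif).Perm (PySem.Set.ofList (pvFL cif)) := by
  rw [pv_B_eq]
  refine (pv_flatMap_perm cif _ (pv_range_nodup cif)).trans ?_
  exact List.Perm.of_eq (List.filter_eq_self.mpr
    (fun k hk => decide_eq_true (pv_mem_range_counts cif k hk)))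

theorem pv_B_pairwise (cif : String) : (conta_ocorren_alt cif).Pairwise (pvR cif) := by
  rw [pv_B_eq]
  exact pv_flatMap_pairwise cif _ (pv_range_pairwise cif)

-- ===== VERDICT (by name: the statement is the Claim_ definition above) =====
theorem conta_ocorren_spec : Claim_equal_conta_ocorren := by
  intro cif _
  unfold Spec_conta_ocorren
  refine List.Perm.eq_of_pairwise ?_ (pv_A_pairwise cif) (pv_B_pairwise cif)
    ((pv_A_perm cif).trans (pv_B_perm cif).symm)
  intro a b _ _ hab hba
  rcases hab with h1 | ⟨h1, h1'⟩ <;> rcases hba with h2 | ⟨h2, h2'⟩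
  · omega
  · omega
  · omega
  · exact (lt_asymm h1' h2').elim
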